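-- pv_equiv track=rewrite | github.com/jinkilee/jinkilee.github.io | code/python/codility/MinMaxDivision.py | solution
-- ===== SOURCE A (Python) =====
-- def validBlock(K, A, target):
-- 	block_sum = 0
-- 	block_cnt = 0
-- 	for ai in A:
-- 		if block_sum + ai > target:
-- 			block_sum = ai
-- 			block_cnt += 1
-- 		else:
-- 			block_sum += ai
--
-- 		if block_cnt >= K:
-- 			return False
-- 	return True
--
-- def solution(K, M, A):
-- 	del M
-- 	lowest = max(A)
-- 	highest = sum(A)
-- 	while lowest <= highest:
-- 		mid = (lowest + highest) // 2
-- 		if validBlock(K, A, mid):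
-- 			highest = mid - 1
-- 		else:
-- 			lowest = mid + 1
-- 	return lowest
-- ===== SOURCE B (Python) =====
-- def solution(K, M, A):
--     # Same name/params as A; M unused. Prefix-sum based feasibility (count of
--     # greedy blocks against a moving base) and a pure recursive bisection.
--     del M
--     P = [0]
--     s = 0
--     for ai in A:
--         s += ai
--         P.append(s)
--
--     def blocks(target):
--         # number of greedy block starts beyond the first, via prefix sums
--         cnt = 0
--         base = 0
--         for p, q in zip(P, P[1:]):
--             if q - base > target:
--                 cnt += 1
--                 base = p
--         return cnt
--
--     def search(lo, hi):
--         if lo > hi: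
--             return lo
--         mid = (lo + hi) // 2
--         if blocks(mid) < K:
--             return search(lo, mid - 1)
--         return search(mid + 1, hi)
--
--     return search(max(A), s)
-- ===== Notes on version B (the rewrite author's own statement) =====
-- stated objective: alternative
-- what changed: A's exact values on non-monotone (negative-element) inputs pin the binary search itself, so B keeps it but re-decomposes both halves: feasibility is computed from a precomputed prefix-sum array with a moving block base and a full-scan block count compared to K (replacing A's running block sum with early exit inside the scan), and the search is a pure recursive bisection instead of a mutating while loop.
-- outside the precondition, e.g. on solution(2, 0, []): A raises ValueError, B raises ValueError
import Mathlib
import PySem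

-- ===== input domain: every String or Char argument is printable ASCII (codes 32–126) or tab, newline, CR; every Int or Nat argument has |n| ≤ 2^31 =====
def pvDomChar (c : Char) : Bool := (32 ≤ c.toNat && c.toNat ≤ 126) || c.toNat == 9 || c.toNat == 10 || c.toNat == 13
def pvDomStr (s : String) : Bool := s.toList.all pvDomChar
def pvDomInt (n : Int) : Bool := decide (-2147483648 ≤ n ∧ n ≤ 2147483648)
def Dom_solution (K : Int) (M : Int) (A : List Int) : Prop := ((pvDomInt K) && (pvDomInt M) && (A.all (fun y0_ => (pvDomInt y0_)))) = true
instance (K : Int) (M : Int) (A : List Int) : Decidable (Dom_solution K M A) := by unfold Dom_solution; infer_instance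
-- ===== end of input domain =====

-- B keeps A's exact binary search on the answer (pinned by A's behaviour on
-- non-monotone inputs) but re-decomposes it: feasibility is a full-scan greedy
-- block count over precomputed prefix sums (no running block sum, no early
-- exit), compared to K, and the search is a pure recursion instead of a
-- mutating while loop. Objective: alternative decomposition, same cost.

-- ===== PORT A =====
def validBlockGo (K : Int) (target : Int) : List Int → Int → Int → Bool
  | [], _, _ => true
  | ai :: rest, block_sum, block_cnt =>
    let st := if block_sum + ai > target then (ai, block_cnt + 1)
              else (block_sum + ai, block_cnt)
    if st.2 ≥ K then false
    else validBlockGo K target rest st.1 st.2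

def validBlock (K : Int) (A : List Int) (target : Int) : Bool :=
  validBlockGo K target A 0 0

def solutionLoop (K : Int) (A : List Int) (lowest highest : Int) : Int :=
  if h : lowest ≤ highest then
    let mid := PySem.Int.floordiv (lowest + highest) 2
    if validBlock K A mid then solutionLoop K A lowest (mid - 1)
    else solutionLoop K A (mid + 1) highest
  else lowest
termination_by (highest + 1 - lowest).toNat
decreasing_by
  · have := PySem.Int.floordiv_two_mid_bounds h; omega
  · have := PySem.Int.floordiv_two_mid_bounds h; omega

def solution (K : Int) (M : Int) (A : List Int) : Int :=
  let lowest := (PySem.List.max? A (fun x => x)).getD 0   -- max(A); Pre_ excludes A = [] where Python raises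
  let highest := A.foldl (· + ·) 0                          -- sum(A)
  solutionLoop K A lowest highest

-- ===== PORT B =====
def prefixState (A : List Int) : List Int × Int :=
  A.foldl (fun Ps ai => (Ps.1 ++ [Ps.2 + ai], Ps.2 + ai)) ([0], 0)

def blocksB (P : List Int) (target : Int) : Int :=
  ((List.zip P (P.drop 1)).foldl
    (fun cb pq => if pq.2 - cb.2 > target then (cb.1 + 1, pq.1) else cb) (0, 0)).1

def searchB (K : Int) (P : List Int) (lo hi : Int) : Int :=
  if h : lo > hi then lo
  else
    let mid := PySem.Int.floordiv (lo + hi) 2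
    if blocksB P mid < K then searchB K P lo (mid - 1)
    else searchB K P (mid + 1) hi
termination_by (hi + 1 - lo).toNat
decreasing_by
  · have := PySem.Int.floordiv_two_mid_bounds (by omega : lo ≤ hi); omega
  · have := PySem.Int.floordiv_two_mid_bounds (by omega : lo ≤ hi); omega

def solution_alt (K : Int) (M : Int) (A : List Int) : Int :=
  let Ps := prefixState A
  searchB K Ps.1 ((PySem.List.max? A (fun x => x)).getD 0) Ps.2

-- ===== PRECONDITION & SPEC =====
-- Pre_ excludes only the empty list, on which Python A raises ValueError (max(A)).
def Pre_solution (K : Int) (M : Int) (A : List Int) : Prop := A ≠ []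
instance (K : Int) (M : Int) (A : List Int) : Decidable (Pre_solution K M A) := by
  unfold Pre_solution; infer_instance
def pvWitness_solution : Int × Int × List Int := (3, 0, [2, 1, 5, 1, 2, 2, 2])

def Spec_solution (K : Int) (M : Int) (A : List Int) (out : Int) : Prop := out = solution_alt K M A
instance (K : Int) (M : Int) (A : List Int) (out : Int) : Decidable (Spec_solution K M A out) := by unfold Spec_solution; infer_instance

-- ===== CLAIM (what is proved, stated in full; the proofs are below) =====
def Claim_equal_solution : Prop := ∀ (K : Int) (M : Int) (A : List Int), Dom_solution K M A → Pre_solution K M A → Spec_solution K M A (solution K M A)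

-- ===== LEMMAS AND PROOFS =====

-- running prefix sums starting after s
def pvScan (s : Int) : List Int → List Int
  | [] => []
  | a :: l => (s + a) :: pvScan (s + a) l

-- consecutive prefix-sum pairs
def pvPairs (s : Int) : List Int → List (Int × Int)
  | [] => []
  | a :: l => (s, s + a) :: pvPairs (s + a) l

-- A-side greedy block count (resets minus one): final value of block_cnt
def pvCount (target : Int) : List Int → Int → Int → Int
  | [], _, c => c
  | a :: l, s, c =>
    if s + a > target then pvCount target l a (c + 1) else pvCount target l (s + a) c

theorem prefixState_eq (A : List Int) :
    ∀ (acc : List Int) (s : Int),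
      A.foldl (fun Ps ai => (Ps.1 ++ [Ps.2 + ai], Ps.2 + ai)) (acc, s)
        = (acc ++ pvScan s A, A.foldl (· + ·) s) := by
  induction A with
  | nil => intro acc s; simp [pvScan]
  | cons a l ih =>
    intro acc s
    simp only [List.foldl_cons, ih (acc ++ [s + a]) (s + a), pvScan, List.append_assoc,
      List.singleton_append]

theorem zip_scan_eq (A : List Int) :
    ∀ s : Int, List.zip (s :: pvScan s A) (pvScan s A) = pvPairs s A := by
  induction A with
  | nil => intro s; simp [pvScan, pvPairs]
  | cons a l ih => intro s; simp [pvScan, pvPairs, ih (s + a)]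

theorem pairs_fold_eq (target : Int) (A : List Int) :
    ∀ (p b c : Int),
      ((pvPairs p A).foldl
        (fun cb pq => if pq.2 - cb.2 > target then (cb.1 + 1, pq.1) else cb) (c, b)).1
        = pvCount target A (p - b) c := by
  induction A with
  | nil => intro p b c; simp [pvPairs, pvCount]
  | cons a l ih =>
    intro p b c
    simp only [pvPairs, List.foldl_cons, pvCount]
    by_cases h : p - b + a > target
    · rw [if_pos (by omega), if_pos h, ih (p + a) p (c + 1)]
      congr 1; omega
    · rw [if_neg (by omega), if_neg h, ih (p + a) b c]
      congr 1; omega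

theorem pvCount_ge (target : Int) (A : List Int) :
    ∀ (s c : Int), c ≤ pvCount target A s c := by
  induction A with
  | nil => intro s c; simp [pvCount]
  | cons a l ih =>
    intro s c
    simp only [pvCount]
    split
    · exact le_trans (by omega) (ih a (c + 1))
    · exact ih (s + a) c

theorem validBlockGo_eq (K target : Int) (A : List Int) :
    ∀ (s c : Int),
      validBlockGo K target A s c = (A.isEmpty || decide (pvCount target A s c < K)) := by
  induction A with
  | nil => intro s c; simp [validBlockGo]
  | cons a l ih =>
    intro s c
    simp only [validBlockGo, pvCount, List.isEmpty_cons, Bool.false_or]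
    by_cases h : s + a > target
    · simp only [if_pos h]
      by_cases hk : c + 1 ≥ K
      · have := pvCount_ge target l a (c + 1)
        simp only [if_pos hk]
        simp; omega
      · simp only [if_neg hk]
        rw [ih a (c + 1)]
        cases l with
        | nil => simp [pvCount]; omega
        | cons b t => simp
    · simp only [if_neg h]
      by_cases hk : c ≥ K
      · have := pvCount_ge target l (s + a) c
        simp only [if_pos hk]
        simp; omega
      · simp only [if_neg hk]
        rw [ih (s + a) c]
        cases l with
        | nil => simp [pvCount]; omega
        | cons b t => simp

theorem blocksB_eq (A : List Int) (target : Int) :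
    blocksB (0 :: pvScan 0 A) target = pvCount target A 0 0 := by
  unfold blocksB
  simp only [List.drop_one, List.tail_cons]
  rw [zip_scan_eq A 0, pairs_fold_eq target A 0 0 0]
  norm_num

theorem validBlock_eq_blocksB (K : Int) (A : List Int) (hA : A ≠ []) (target : Int) :
    validBlock K A target = decide (blocksB (0 :: pvScan 0 A) target < K) := by
  rw [validBlock, validBlockGo_eq, blocksB_eq A target]
  cases A with
  | nil => exact absurd rfl hA
  | cons a l => simp

theorem loop_eq (K : Int) (A : List Int) (P : List Int)
    (hvb : ∀ t, validBlock K A t = decide (blocksB P t < K)) :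
    ∀ lo hi, solutionLoop K A lo hi = searchB K P lo hi := by
  intro lo hi
  fun_induction solutionLoop K A lo hi with
  | case1 lo hi h mid hv ih =>
    rw [searchB]
    rw [dif_neg (by omega : ¬ lo > hi)]
    have : blocksB P (PySem.Int.floordiv (lo + hi) 2) < K := by
      have hvt := hvb (PySem.Int.floordiv (lo + hi) 2)
      rw [hvt] at hv; exact of_decide_eq_true hv
    rw [if_pos this]; exact ih
  | case2 lo hi h mid hv ih =>
    rw [searchB]
    rw [dif_neg (by omega : ¬ lo > hi)]
    have hvt := hvb (PySem.Int.floordiv (lo + hi) 2)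
    have : ¬ blocksB P (PySem.Int.floordiv (lo + hi) 2) < K := by
      intro hc
      exact hv (by rw [hvt]; exact decide_eq_true hc)
    rw [if_neg this]; exact ih
  | case3 lo hi h =>
    rw [searchB, dif_pos (by omega : lo > hi)]

-- ===== VERDICT (by name: the statement is the Claim_ definition above) =====
theorem solution_spec : Claim_equal_solution := by
  intro K M A _ hA
  unfold Spec_solution solution solution_alt
  have hP : prefixState A = (0 :: pvScan 0 A, A.foldl (· + ·) 0) := by
    unfold prefixState
    rw [prefixState_eq A [0] 0]
    simp
  rw [hP]
  exact loop_eq K A (0 :: pvScan 0 A) (fun t => validBlock_eq_blocksB K A hA t) _ _
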